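-- pv_equiv track=rewrite | github.com/winter-olaf/algorithm-study | Programmers/최준원/월간챌린지/3-3.py | solution
-- ===== SOURCE A (Python) =====
-- import collections
--
-- def solution(a):
--     c = collections.Counter(a)
--     var = 0
--     mc = c.most_common()
--     max_num = mc[0][1]
--     for (x, y) in mc[1:]:
--         var+=y
--     if (max_num <= var):
--         return (max_num * 2)
--     else:
--         return ((max_num - 2) * 2)
-- ===== SOURCE B (Python) =====
-- def solution(a):
--     s = sorted(a)
--     prev = s[0]  # IndexError on empty input, like A's mc[0]
--     max_num = 1
--     run = 1
--     for x in s[1:]: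
--         if x == prev:
--             run += 1
--         else:
--             run = 1
--         if run > max_num:
--             max_num = run
--         prev = x
--     var = len(a) - max_num
--     return max_num * 2 if max_num <= var else (max_num - 2) * 2
-- ===== Notes on version B (the rewrite author's own statement) =====
-- stated objective: alternative
-- what changed: Replaces the Counter/most_common hash-table pass with sorting the list and scanning runs of equal consecutive elements to find the maximum frequency; the rest-sum is computed as len(a) - max_num instead of summing the other counts.
import Mathlib
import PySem

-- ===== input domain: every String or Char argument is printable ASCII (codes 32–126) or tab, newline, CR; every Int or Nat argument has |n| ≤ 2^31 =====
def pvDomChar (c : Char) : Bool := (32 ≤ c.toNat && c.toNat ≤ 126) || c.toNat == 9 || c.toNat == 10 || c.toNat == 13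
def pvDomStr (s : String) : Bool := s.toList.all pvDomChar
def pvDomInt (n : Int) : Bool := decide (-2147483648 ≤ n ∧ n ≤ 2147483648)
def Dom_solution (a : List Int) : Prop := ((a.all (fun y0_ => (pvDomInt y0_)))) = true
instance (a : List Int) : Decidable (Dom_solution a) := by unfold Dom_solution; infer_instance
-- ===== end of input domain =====

-- B replaces A's Counter/most_common pass by sort-then-scan of runs of equal elements (alternative decomposition, same results for nonempty input; both raise IndexError on []).


-- ===== PORT A =====
def solution (a : List Int) : Int :=
  let c := PySem.Dict.counter a
  let var : Int := 0
  let mc := PySem.List.sorted c.items (fun p => p.2) true   -- c.most_common(): sorted by count descending, stable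
  match mc with
  | [] => 0   -- Python: mc[0] raises IndexError here; excluded by Pre_solution
  | m :: _ =>
    let max_num := m.2
    let var := (PySem.List.slice mc (some 1) none).foldl (fun v p => v + p.2) var
    if max_num ≤ var then max_num * 2 else (max_num - 2) * 2

-- ===== PORT B =====
-- loop body of B: run is extended or reset, max_num updated, prev replaced
def pvStep (st : Int × Int × Int) (x : Int) : Int × Int × Int :=
  let run := if x == st.2.2 then st.2.1 + 1 else 1
  let max_num := if run > st.1 then run else st.1
  (max_num, run, x)

def solution_alt (a : List Int) : Int :=
  let s := PySem.List.sorted a (fun x => x) false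
  match s with
  | [] => 0   -- Python: s[0] raises IndexError here; excluded by Pre_solution
  | prev :: rest =>
    let st := rest.foldl pvStep (1, 1, prev)
    let max_num := st.1
    let var := (a.length : Int) - max_num
    if max_num ≤ var then max_num * 2 else (max_num - 2) * 2

-- ===== PRECONDITION & SPEC =====
-- Pre_ excludes only the empty list, on which A raises IndexError (mc[0]); B raises there too (s[0]).
def Pre_solution (a : List Int) : Prop := a ≠ []
instance (a : List Int) : Decidable (Pre_solution a) := by unfold Pre_solution; infer_instance
def pvWitness_solution : List Int := [1, 2, 2]

def Spec_solution (a : List Int) (out : Int) : Prop := out = solution_alt a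
instance (a : List Int) (out : Int) : Decidable (Spec_solution a out) := by unfold Spec_solution; infer_instance

-- ===== CLAIM (what is proved, stated in full; the proofs are below) =====
def Claim_equal_solution : Prop := ∀ (a : List Int), Dom_solution a → Pre_solution a → Spec_solution a (solution a)

-- ===== LEMMAS AND PROOFS =====

-- B's loop invariant: processing rest after a sorted, nonempty prefix l whose last value is prev,
-- with run = count of prev in l and maxn = the maximal count in l, yields the maximal count of l ++ rest.
lemma pv_loop_inv (rest : List Int) : ∀ (l : List Int) (maxn prev : Int),
    (l ++ rest).Pairwise (· ≤ ·) → prev ∈ l → (∀ y ∈ l, y ≤ prev) →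
    (∃ z ∈ l, (l.count z : Int) = maxn) → (∀ x ∈ l, (l.count x : Int) ≤ maxn) →
    (∃ z ∈ l ++ rest, ((l ++ rest).count z : Int) = (rest.foldl pvStep (maxn, (l.count prev : Int), prev)).1)
    ∧ ∀ x ∈ l ++ rest, ((l ++ rest).count x : Int) ≤ (rest.foldl pvStep (maxn, (l.count prev : Int), prev)).1 := by
  induction rest with
  | nil =>
    intro l maxn prev _ hprev _ hex hub
    simpa using ⟨hex, hub⟩
  | cons x rest' ih =>
    intro l maxn prev hpw hprev hle hex hub
    have hxge : prev ≤ x := by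
      exact (List.pairwise_append.mp hpw).2.2 prev hprev x (by simp)
    have hrun : (if x == prev then (l.count prev : Int) + 1 else 1) = (((l ++ [x]).count x : Int)) := by
      by_cases hxy : x = prev
      · subst hxy; simp [List.count_append]
      · have hxnl : x ∉ l := fun hx => hxy (le_antisymm (hle x hx) hxge)
        simp [hxy, List.count_append, List.count_eq_zero.mpr hxnl]
    set run' : Int := (((l ++ [x]).count x : Int)) with hrdef
    have hstep : pvStep (maxn, (l.count prev : Int), prev) x
        = (if run' > maxn then run' else maxn, run', x) := by
      simp only [pvStep, hrdef]
      rw [hrun]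
    set maxn' : Int := if run' > maxn then run' else maxn with hmdef
    -- counts in l ++ [x]
    have hcnt_ne : ∀ y, y ≠ x → (((l ++ [x]).count y : Int)) = ((l.count y : Int)) := by
      intro y hy; simp [List.count_append, Ne.symm hy]
    have hex' : ∃ z ∈ l ++ [x], (((l ++ [x]).count z : Int)) = maxn' := by
      by_cases hgt : run' > maxn
      · exact ⟨x, by simp, by rw [hmdef, if_pos hgt, hrdef]⟩
      · obtain ⟨z, hz, hcz⟩ := hex
        have hzx : z ≠ x := by
          intro hzx
          by_cases hxy : x = prev
          · have hca : (l ++ [x]).count x = l.count x + 1 := by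
              simp [List.count_append]
            have hcx : run' = (l.count x : Int) + 1 := by
              rw [hrdef, hca]; push_cast; ring
            rw [hzx] at hcz
            omega
          · have hxnl : x ∉ l := fun hx => hxy (le_antisymm (hle x hx) hxge)
            exact hxnl (hzx ▸ hz)
        exact ⟨z, by simp [hz], by rw [hcnt_ne z hzx, hcz, hmdef, if_neg hgt]⟩
    have hub' : ∀ y ∈ l ++ [x], (((l ++ [x]).count y : Int)) ≤ maxn' := by
      intro y hy
      by_cases hyx : y = x
      · subst hyx; rw [← hrdef, hmdef]; split <;> omega
      · rcases List.mem_append.mp hy with hyl | hyl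
        · rw [hcnt_ne y hyx]
          calc ((l.count y : Int)) ≤ maxn := hub y hyl
            _ ≤ maxn' := by rw [hmdef]; split <;> omega
        · simp at hyl; exact absurd hyl hyx
    have hle' : ∀ y ∈ l ++ [x], y ≤ x := by
      intro y hy
      rcases List.mem_append.mp hy with hyl | hyl
      · exact le_trans (hle y hyl) hxge
      · simp at hyl; omega
    have hpw' : ((l ++ [x]) ++ rest').Pairwise (· ≤ ·) := by
      rw [List.append_assoc]; simpa using hpw
    have := ih (l ++ [x]) maxn' x hpw' (by simp) hle' hex' hub'
    rw [List.foldl_cons, hstep]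
    have hassoc : l ++ x :: rest' = (l ++ [x]) ++ rest' := by simp
    rw [hassoc]
    simpa [hrdef] using this

-- characterization of B's result for nonempty input
lemma pv_alt_spec (a : List Int) (h : a ≠ []) :
    ∃ M : Int, (∃ z ∈ a, (a.count z : Int) = M) ∧ (∀ x ∈ a, (a.count x : Int) ≤ M) ∧
      solution_alt a = (if M ≤ (a.length : Int) - M then M * 2 else (M - 2) * 2) := by
  have hs : PySem.List.sorted a (fun x => x) false ≠ [] := by
    rw [Ne, PySem.List.sorted_eq_nil_iff]; exact h
  obtain ⟨prev, rest, hsr⟩ := List.exists_cons_of_ne_nil hs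
  have hperm : (PySem.List.sorted a (fun x => x) false).Perm a := PySem.List.sorted_perm a _ _
  have hpw : (prev :: rest).Pairwise (· ≤ ·) := by
    have := PySem.List.sorted_pairwise a (fun x => x)
    rw [hsr] at this; simpa using this
  have hc1 : (([prev].count prev : Int)) = 1 := by simp
  have hinv := pv_loop_inv rest [prev] 1 prev (by simpa using hpw) (by simp) (by simp)
    ⟨prev, by simp, by simp⟩ (by intro x hx; simp at hx; simp [hx])
  rw [hc1] at hinv
  obtain ⟨⟨z, hz, hcz⟩, hub⟩ := hinv
  have hmem : ∀ y, y ∈ [prev] ++ rest ↔ y ∈ a := by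
    intro y; rw [← hperm.mem_iff, hsr]; simp
  have hcnt : ∀ y, ([prev] ++ rest).count y = a.count y := by
    intro y
    have := hperm.count_eq y
    rw [hsr] at this; simpa using this
  refine ⟨(rest.foldl pvStep (1, 1, prev)).1, ⟨z, (hmem z).mp hz, by rw [← hcnt z]; exact hcz⟩,
    ?_, ?_⟩
  · intro x hx
    rw [← hcnt x]
    exact hub x ((hmem x).mpr hx)
  · simp only [solution_alt, hsr]

-- folding addition of second components is the sum of the mapped list
lemma pv_foldl_add : ∀ (t : List (Int × Int)) (c : Int),
    t.foldl (fun v p => v + p.2) c = c + (t.map (fun p => (p.2 : Int))).sum := by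
  intro t
  induction t with
  | nil => intro c; simp
  | cons p t ih => intro c; simp [ih]; ring

-- sum of the counter's values is the length of the list
lemma pv_sum_counts (a : List Int) :
    (((PySem.Set.ofList a).map (fun k => ((a.count k : Int)))).sum) = (a.length : Int) := by
  have hperm : (PySem.Set.ofList a : List Int).Perm a.dedup := by
    rw [List.perm_ext_iff_of_nodup (PySem.Set.nodup_ofList a) a.nodup_dedup]
    intro x; rw [PySem.Set.mem_ofList, List.mem_dedup]
  rw [(hperm.map (fun k => ((a.count k : Int)))).sum_eq]
  have hnat : (a.dedup.map (fun x => a.count x)).sum = a.length :=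
    List.sum_map_count_dedup_eq_length a
  have : (a.dedup.map (fun k => ((a.count k : Int)))).sum
      = (((a.dedup.map (fun x => a.count x)).sum : Nat) : Int) := by
    rw [Nat.cast_list_sum, List.map_map]; rfl
  rw [this, hnat]

-- characterization of A's result for nonempty input
lemma pv_a_spec (a : List Int) (h : a ≠ []) :
    ∃ M : Int, (∃ z ∈ a, (a.count z : Int) = M) ∧ (∀ x ∈ a, (a.count x : Int) ≤ M) ∧
      solution a = (if M ≤ (a.length : Int) - M then M * 2 else (M - 2) * 2) := by
  have hitems : (PySem.Dict.counter a).items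
      = (PySem.Set.ofList a).map (fun k => (k, (a.count k : Int))) :=
    PySem.Dict.items_counter a
  have hane : ∃ x, x ∈ a := by
    cases a with
    | nil => exact absurd rfl h
    | cons x t => exact ⟨x, by simp⟩
  obtain ⟨x0, hx0⟩ := hane
  have hne : (PySem.Dict.counter a).items ≠ [] := by
    rw [hitems]
    intro hnil
    have : x0 ∈ (PySem.Set.ofList a : List Int) := (PySem.Set.mem_ofList a x0).mpr hx0
    rw [List.map_eq_nil_iff.mp hnil] at this
    simp at this
  have hmcne : PySem.List.sorted (PySem.Dict.counter a).items (fun p => p.2) true ≠ [] := by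
    rw [Ne, PySem.List.sorted_eq_nil_iff]; exact hne
  obtain ⟨m, t, hmc⟩ := List.exists_cons_of_ne_nil hmcne
  -- the head is a (key, count) pair with maximal count
  have hmmem : m ∈ (PySem.Dict.counter a).items := by
    have hm : m ∈ PySem.List.sorted (PySem.Dict.counter a).items (fun p => p.2) true := by
      rw [hmc]; simp
    exact (PySem.List.mem_sorted _ _ _ _).mp hm
  have hmk : ∃ k, k ∈ a ∧ m = (k, (a.count k : Int)) := by
    rw [hitems] at hmmem
    obtain ⟨k, hk, hkm⟩ := List.mem_map.mp hmmem
    exact ⟨k, (PySem.Set.mem_ofList a k).mp hk, hkm.symm⟩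
  obtain ⟨k, hka, hkm⟩ := hmk
  have hhead : ∀ y ∈ (PySem.Dict.counter a).items, y.2 ≤ m.2 :=
    PySem.List.key_head_sorted_rev_ge _ _ hmc
  have hub : ∀ x ∈ a, (a.count x : Int) ≤ m.2 := by
    intro x hx
    have : (x, (a.count x : Int)) ∈ (PySem.Dict.counter a).items := by
      rw [hitems]
      exact List.mem_map.mpr ⟨x, (PySem.Set.mem_ofList a x).mpr hx, rfl⟩
    exact hhead _ this
  -- the values of mc sum to a.length
  have hpermmc : (PySem.List.sorted (PySem.Dict.counter a).items (fun p => p.2) true).Perm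
      (PySem.Dict.counter a).items := PySem.List.sorted_perm _ _ _
  have hsum : ((m :: t).map (fun p => (p.2 : Int))).sum = (a.length : Int) := by
    rw [← hmc, (hpermmc.map (fun p => (p.2 : Int))).sum_eq, hitems, List.map_map]
    have : ((fun p => (p.2 : Int)) ∘ (fun k => ((k, (a.count k : Int)) : Int × Int)))
        = fun k => ((a.count k : Int)) := rfl
    rw [this]
    exact pv_sum_counts a
  have htsum : (t.map (fun p => (p.2 : Int))).sum = (a.length : Int) - m.2 := by
    simp at hsum
    omega
  refine ⟨m.2, ⟨k, hka, by rw [hkm]⟩, hub, ?_⟩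
  simp only [solution, hmc, PySem.List.slice_from_one, List.tail_cons]
  rw [pv_foldl_add]
  rw [htsum]
  simp

-- ===== VERDICT (by name: the statement is the Claim_ definition above) =====
theorem solution_spec : Claim_equal_solution := by
  intro a _ hpre
  obtain ⟨MA, ⟨zA, hzA, hcA⟩, hboundA, hA⟩ := pv_a_spec a hpre
  obtain ⟨MB, ⟨zB, hzB, hcB⟩, hboundB, hB⟩ := pv_alt_spec a hpre
  have : MA = MB := le_antisymm (hcA ▸ hboundB zA hzA) (hcB ▸ hboundA zB hzB)
  unfold Spec_solution
  rw [hA, hB, this]
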